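-- pv_equiv track=rewrite | github.com/open-needs/open-needs-ide | needls/server.py | col_to_word_index
-- ===== SOURCE A (Python) =====
-- from typing import List, Tuple
--
-- def col_to_word_index(col: int, words: List[str]) -> int:
--     """Return the index of a word in a list of words for a given line character column."""
--     length = 0
--     index = 0
--     for word in words:
--         length = length + len(word)
--         if col <= length + index:
--             return index
--         index = index + 1
--     return index - 1
-- ===== SOURCE B (Python) =====
-- from bisect import bisect_left
-- from itertools import accumulate
-- from typing import List
--
--
-- def col_to_word_index(col: int, words: List[str]) -> int:
--     """Return the index of a word in a list of words for a given line character column."""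
--     # thresholds[i] = (len of words[0..i]) + i + 1; strictly increasing
--     thresholds = list(accumulate(len(w) + 1 for w in words))
--     i = bisect_left(thresholds, col + 1)
--     if i == len(words):
--         return len(words) - 1
--     return i
-- ===== Notes on version B (the rewrite author's own statement) =====
-- stated objective: alternative
-- what changed: Replaces A's early-return running-sum scan with a precomputed prefix-threshold table (cumulative word lengths plus one separator each) searched with bisect_left, mapping the past-the-end case to len(words)-1.
import Mathlib
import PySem

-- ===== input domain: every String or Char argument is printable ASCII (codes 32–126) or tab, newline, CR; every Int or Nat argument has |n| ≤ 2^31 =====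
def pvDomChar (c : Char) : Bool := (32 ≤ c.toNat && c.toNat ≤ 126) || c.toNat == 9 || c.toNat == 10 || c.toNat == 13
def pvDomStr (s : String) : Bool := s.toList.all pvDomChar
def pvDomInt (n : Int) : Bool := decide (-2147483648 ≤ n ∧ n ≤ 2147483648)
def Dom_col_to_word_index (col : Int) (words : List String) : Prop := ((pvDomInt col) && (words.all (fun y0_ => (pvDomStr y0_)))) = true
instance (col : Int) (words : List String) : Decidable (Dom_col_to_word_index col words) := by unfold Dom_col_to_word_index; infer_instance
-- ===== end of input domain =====

-- B replaces A's early-return running-sum scan by a prefix-threshold table plus binary search (bisect_left); alternative decomposition, same result.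

-- ===== PORT A =====
-- A's for-loop with running `length`/`index` and early return, as structural recursion
def pvGoA (col : Int) (words : List String) (length index : Int) : Int :=
  match words with
  | [] => index - 1
  | w :: ws =>
    let length := length + PySem.Str.len w
    if col ≤ length + index then index
    else pvGoA col ws length (index + 1)

def col_to_word_index (col : Int) (words : List String) : Int :=
  pvGoA col words 0 0

-- ===== PORT B =====
-- itertools.accumulate(len(w) + 1 for w in words) with running sum s
def pvAccum (words : List String) (s : Int) : List Int :=
  match words with
  | [] => []
  | w :: ws =>
    let s' := s + PySem.Str.len w + 1
    s' :: pvAccum ws s'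

def col_to_word_index_alt (col : Int) (words : List String) : Int :=
  let thresholds := pvAccum words 0
  let i := PySem.List.bisectLeft thresholds (col + 1)
  if i = words.length then (words.length : Int) - 1 else (i : Int)

-- ===== PRECONDITION & SPEC =====
def Spec_col_to_word_index (col : Int) (words : List String) (out : Int) : Prop := out = col_to_word_index_alt col words
instance (col : Int) (words : List String) (out : Int) : Decidable (Spec_col_to_word_index col words out) := by unfold Spec_col_to_word_index; infer_instance

-- ===== CLAIM (what is proved, stated in full; the proofs are below) =====
def Claim_equal_col_to_word_index : Prop := ∀ (col : Int) (words : List String), Dom_col_to_word_index col words → Spec_col_to_word_index col words (col_to_word_index col words)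

-- ===== LEMMAS AND PROOFS =====

theorem pvAccum_lt (words : List String) (s : Int) : ∀ v ∈ pvAccum words s, s < v := by
  induction words generalizing s with
  | nil => simp [pvAccum]
  | cons w ws ih =>
    intro v hv
    simp only [pvAccum, List.mem_cons] at hv
    have hlen : (0:Int) ≤ PySem.Str.len w := by
      rw [PySem.Str.len_eq]; positivity
    rcases hv with rfl | hv
    · omega
    · have := ih _ v hv
      omega

theorem pvAccum_sorted (words : List String) (s : Int) :
    List.Pairwise (fun a b => a ≤ b) (pvAccum words s) := by
  induction words generalizing s with
  | nil => simp [pvAccum]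
  | cons w ws ih =>
    simp only [pvAccum]
    refine List.Pairwise.cons ?_ (ih _)
    intro v hv
    exact le_of_lt (pvAccum_lt ws _ v hv)

-- bisect_left on the (sorted) threshold table is findIdx of the first element ≥ x
theorem bisect_eq_findIdx (words : List String) (s x : Int) :
    PySem.List.bisectLeft (pvAccum words s) x
      = (pvAccum words s).findIdx (fun v => decide (x ≤ v)) := by
  set t := pvAccum words s with ht
  obtain ⟨hle, hlt, hge⟩ := PySem.List.bisectLeft_spec t x (pvAccum_sorted words s)
  set n := PySem.List.bisectLeft t x with hn
  rcases eq_or_lt_of_le hle with h | h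
  · rw [h]
    symm
    rw [List.findIdx_eq_length]
    intro a ha
    obtain ⟨j, hj, rfl⟩ := List.mem_iff_getElem.1 ha
    simpa using not_le_of_gt (hlt j hj (h ▸ hj))
  · symm
    rw [List.findIdx_eq h]
    refine ⟨by simpa using hge n h (le_refl n), fun j hj => ?_⟩
    simpa using not_le_of_gt (hlt j (lt_trans hj h) hj)

-- A's loop computes findIdx over the threshold table started at L + I (then falls back to last index)
theorem pvGoA_eq (col : Int) (ws : List String) (L I : Int) :
    pvGoA col ws L I =
      (let i := (pvAccum ws (L + I)).findIdx (fun v => decide (col + 1 ≤ v));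
       if i = ws.length then I + (ws.length : Int) - 1 else I + (i : Int)) := by
  induction ws generalizing L I with
  | nil => simp [pvGoA, pvAccum]
  | cons w ws ih =>
    simp only [pvGoA, pvAccum, List.findIdx_cons, List.length_cons]
    have harg : L + I + PySem.Str.len w + 1 = L + PySem.Str.len w + (I + 1) := by ring
    rw [harg]
    by_cases h : col ≤ L + PySem.Str.len w + I
    · rw [if_pos h]
      have hc : decide (col + 1 ≤ L + PySem.Str.len w + (I + 1)) = true := by
        simp only [decide_eq_true_eq]; omega
      rw [hc]; simp only [cond_true]
      rw [if_neg (by omega : ¬ ((0 : Nat) = ws.length + 1))]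
      simp
    · rw [if_neg h, ih (L + PySem.Str.len w) (I + 1)]
      have hc : decide (col + 1 ≤ L + PySem.Str.len w + (I + 1)) = false := by
        simp only [decide_eq_false_iff_not, not_le]; omega
      rw [hc]; simp only [cond_false]
      set i' := (pvAccum ws (L + PySem.Str.len w + (I + 1))).findIdx (fun v => decide (col + 1 ≤ v))
      by_cases hi : i' = ws.length
      · rw [if_pos hi, if_pos (by omega : i' + 1 = ws.length + 1)]
        push_cast; ring
      · rw [if_neg hi, if_neg (by omega : ¬ (i' + 1 = ws.length + 1))]
        push_cast; ring

-- ===== VERDICT (by name: the statement is the Claim_ definition above) =====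
theorem col_to_word_index_spec : Claim_equal_col_to_word_index := by
  intro col words _
  unfold Spec_col_to_word_index
  simp only [col_to_word_index, col_to_word_index_alt, pvGoA_eq, bisect_eq_findIdx, zero_add]
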